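-- pv_equiv track=rewrite | github.com/mmm1h/talk2agent | tests/ptb_telegram_helpers.py | _linewise_startswith
-- ===== SOURCE A (Python) =====
-- def _linewise_startswith(text, prefix):
--     actual_lines = text.splitlines()
--     prefix_lines = prefix.splitlines()
--     if not prefix_lines:
--         return True
--     match_index = 0
--     for actual_line in actual_lines:
--         if actual_line.startswith(prefix_lines[match_index]):
--             match_index += 1
--             if match_index == len(prefix_lines):
--                 return True
--     return False
-- ===== SOURCE B (Python) =====
-- def _linewise_startswith(text, prefix):
--     lines = text.splitlines()
--     pos = -1
--     for p in prefix.splitlines():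
--         matches = [i for i, line in enumerate(lines) if line.startswith(p)]
--         pos = next((i for i in matches if i > pos), None)
--         if pos is None:
--             return False
--     return True
-- ===== Notes on version B (the rewrite author's own statement) =====
-- stated objective: alternative
-- what changed: Inverts the loop nesting: instead of a single pass over the text lines advancing a pointer into the prefix lines, B loops over the prefix lines and for each builds the full list of matching text-line indices with enumerate, then picks the first index past the previous position.
import Mathlib
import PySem

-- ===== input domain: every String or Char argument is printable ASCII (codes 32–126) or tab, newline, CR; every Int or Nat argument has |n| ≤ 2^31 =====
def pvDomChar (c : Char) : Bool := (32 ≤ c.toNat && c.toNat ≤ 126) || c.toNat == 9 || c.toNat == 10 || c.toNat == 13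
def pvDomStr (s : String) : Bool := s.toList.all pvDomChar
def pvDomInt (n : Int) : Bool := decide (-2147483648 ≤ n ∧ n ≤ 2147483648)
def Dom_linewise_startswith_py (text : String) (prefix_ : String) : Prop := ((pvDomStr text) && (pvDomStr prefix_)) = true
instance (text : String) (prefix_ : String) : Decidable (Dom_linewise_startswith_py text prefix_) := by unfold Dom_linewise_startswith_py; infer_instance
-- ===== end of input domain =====

-- B inverts the loop nesting: instead of one pass over the text lines with a pointer into the
-- prefix lines, it loops over the prefix lines and, for each, builds the full list of matching
-- line indices and selects the first one past the previous position (objective: alternative).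
-- ===== PORT A =====
-- loop over actual_lines carrying match_index; early return on match_index == len(prefix_lines)
def pvAGo (plines : List String) : List String → Nat → Bool
  | [], _ => false
  | l :: ls, mi =>
    match PySem.List.pyGet? plines (mi : Int) with
    | none => false  -- unreachable: mi < plines.length on every call
    | some p =>
      if PySem.Str.startswith l p then
        if mi + 1 = plines.length then true else pvAGo plines ls (mi + 1)
      else pvAGo plines ls mi

def linewise_startswith_py (text : String) (prefix_ : String) : Bool :=
  let actual_lines := PySem.Str.splitlines text
  let prefix_lines := PySem.Str.splitlines prefix_
  if prefix_lines.isEmpty then true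
  else pvAGo prefix_lines actual_lines 0

-- ===== PORT B =====
-- outer loop 'for p in prefix.splitlines()' carrying pos (initially -1);
-- per p: 'matches = [i for i, line in enumerate(lines) if line.startswith(p)]'
-- then 'next((i for i in matches if i > pos), None)'; None → return False
def pvBGo (lines : List String) : List String → Int → Bool
  | [], _ => true
  | p :: ps, pos =>
    let ms := ((PySem.List.enumerate lines 0).filter (fun il => PySem.Str.startswith il.2 p)).map (·.1)
    match ms.find? (fun i => decide (pos < i)) with
    | none => false
    | some i => pvBGo lines ps i

def linewise_startswith_py_alt (text : String) (prefix_ : String) : Bool :=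
  pvBGo (PySem.Str.splitlines text) (PySem.Str.splitlines prefix_) (-1)

-- ===== PRECONDITION & SPEC =====
def Spec_linewise_startswith_py (text : String) (prefix_ : String) (out : Bool) : Prop := out = linewise_startswith_py_alt text prefix_
instance (text : String) (prefix_ : String) (out : Bool) : Decidable (Spec_linewise_startswith_py text prefix_ out) := by unfold Spec_linewise_startswith_py; infer_instance

-- ===== CLAIM (what is proved, stated in full; the proofs are below) =====
def Claim_equal_linewise_startswith_py : Prop := ∀ (text : String) (prefix_ : String), Dom_linewise_startswith_py text prefix_ → Spec_linewise_startswith_py text prefix_ (linewise_startswith_py text prefix_)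

-- ===== LEMMAS AND PROOFS =====
-- proof intermediate: the consume-based structural recursion both ports are reduced to
def pvConsume (p : String) : List String → Option (List String)
  | [] => none
  | l :: ls => if PySem.Str.startswith l p then some ls else pvConsume p ls

def pvAltGo : List String → List String → Bool
  | [], _ => true
  | p :: ps, lines =>
    match pvConsume p lines with
    | none => false
    | some rest => pvAltGo ps rest

theorem pvAGo_eq_altGo (plines : List String) (lines : List String) (mi : Nat)
    (h : mi < plines.length) :
    pvAGo plines lines mi = pvAltGo (plines.drop mi) lines := by
  induction lines generalizing mi with
  | nil =>
    have hne : plines.drop mi ≠ [] := by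
      simp [List.drop_eq_nil_iff]; omega
    cases hd : plines.drop mi with
    | nil => exact absurd hd hne
    | cons p ps => simp [pvAGo, pvAltGo, pvConsume]
  | cons l ls ih =>
    have hget : PySem.List.pyGet? plines (mi : Int) = some plines[mi] :=
      PySem.List.pyGet?_ofNat plines mi h
    have hdrop : plines.drop mi = plines[mi] :: plines.drop (mi + 1) :=
      List.drop_eq_getElem_cons h
    rw [hdrop]
    by_cases hsw : PySem.Chars.startswith l.toList plines[mi].toList = true
    · by_cases hend : mi + 1 = plines.length
      · have : plines.drop (mi + 1) = [] := by simp [hend]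
        simp [pvAGo, hget, hsw, hend, pvAltGo, pvConsume]
      · have hlt : mi + 1 < plines.length := by omega
        simp [pvAGo, hget, hsw, hend, pvAltGo, pvConsume, ih (mi + 1) hlt]
    · have := ih mi h
      rw [hdrop] at this
      simp [pvAGo, hget, hsw, pvAltGo, pvConsume, this]

-- B-side helpers: the per-p index list, abstracted over the enumerate start
def pvF (p : String) (s : Int) (ls : List String) : List Int :=
  ((PySem.List.enumerate ls s).filter (fun il => PySem.Str.startswith il.2 p)).map (·.1)

theorem pvConsume_eq_findIdx? (p : String) (ls : List String) :
    pvConsume p ls = (ls.findIdx? (fun l => PySem.Chars.startswith l.toList p.toList)).map (fun j => ls.drop (j + 1)) := by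
  induction ls with
  | nil => simp [pvConsume]
  | cons l ls ih =>
    rw [List.findIdx?_cons]
    by_cases hsw : PySem.Chars.startswith l.toList p.toList = true
    · simp [pvConsume, show PySem.Str.startswith l p = PySem.Chars.startswith l.toList p.toList from rfl, hsw]
    · simp [pvConsume, show PySem.Str.startswith l p = PySem.Chars.startswith l.toList p.toList from rfl, hsw, ih,
        Option.map_map, Function.comp]
      rfl

theorem pvF_mem_bounds (p : String) (s : Int) (ls : List String) (i : Int)
    (h : i ∈ pvF p s ls) : s ≤ i ∧ i < s + ls.length := by
  unfold pvF at h
  simp only [List.mem_map, List.mem_filter] at h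
  obtain ⟨⟨a, b⟩, ⟨hmem, _⟩, rfl⟩ := h
  rw [PySem.List.mem_enumerate_iff] at hmem
  obtain ⟨k, hk, heq⟩ := hmem
  simp only [Prod.mk.injEq] at heq
  obtain ⟨h1, _⟩ := heq
  constructor <;> omega

theorem pvF_cons (p l : String) (s : Int) (ls : List String) :
    pvF p s (l :: ls) = (if PySem.Chars.startswith l.toList p.toList then [s] else []) ++ pvF p (s + 1) ls := by
  by_cases hsw : PySem.Chars.startswith l.toList p.toList = true
  · simp [pvF, PySem.List.enumerate_cons, List.filter_cons,
      show PySem.Str.startswith l p = PySem.Chars.startswith l.toList p.toList from rfl, hsw]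
  · simp [pvF, PySem.List.enumerate_cons, List.filter_cons,
      show PySem.Str.startswith l p = PySem.Chars.startswith l.toList p.toList from rfl, hsw]

theorem pvF_head? (p : String) (s : Int) (ls : List String) :
    (pvF p s ls).head? = (ls.findIdx? (fun l => PySem.Chars.startswith l.toList p.toList)).map (fun j => s + (j : Int)) := by
  induction ls generalizing s with
  | nil => simp [pvF]
  | cons l ls ih =>
    rw [pvF_cons, List.findIdx?_cons]
    by_cases hsw : PySem.Chars.startswith l.toList p.toList = true
    · simp [hsw]
    · simp only [hsw, if_false, Bool.false_eq_true, List.nil_append]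
      rw [ih (s + 1)]
      cases List.findIdx? (fun l => PySem.Chars.startswith l.toList p.toList) ls with
      | none => simp
      | some j => simp; omega

theorem pvF_append (p : String) (s : Int) (xs ys : List String) :
    pvF p s (xs ++ ys) = pvF p s xs ++ pvF p (s + xs.length) ys := by
  simp [pvF, PySem.List.enumerate_append]

theorem find?_all_true {α : Type} (q : α → Bool) (l : List α)
    (h : ∀ x ∈ l, q x = true) : l.find? q = l.head? := by
  cases l with
  | nil => rfl
  | cons x xs => simp [h x (by simp)]

theorem pvF_find?_drop (p : String) (lines : List String) (k : Nat) (hk : k ≤ lines.length) :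
    (pvF p 0 lines).find? (fun i => decide (((k : Int) - 1) < i))
      = ((lines.drop k).findIdx? (fun l => PySem.Chars.startswith l.toList p.toList)).map (fun j => ((k : Int) + (j : Int))) := by
  have hsplit : lines = lines.take k ++ lines.drop k := (List.take_append_drop k lines).symm
  conv_lhs => rw [hsplit, pvF_append, List.find?_append]
  have hlen : (lines.take k).length = k := by
    rw [List.length_take]; omega
  have h1 : (pvF p 0 (lines.take k)).find? (fun i => decide (((k : Int) - 1) < i)) = none := by
    rw [List.find?_eq_none]
    intro i hi
    have := pvF_mem_bounds p 0 (lines.take k) i hi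
    rw [hlen] at this
    simp only [decide_eq_true_eq, not_lt]
    omega
  rw [h1, Option.none_or]
  rw [find?_all_true _ _ (by
    intro i hi
    have := pvF_mem_bounds p (0 + (lines.take k).length) (lines.drop k) i hi
    rw [hlen] at this
    simp only [decide_eq_true_eq]
    omega)]
  rw [pvF_head?]
  cases List.findIdx? (fun l => PySem.Chars.startswith l.toList p.toList) (lines.drop k) with
  | none => simp
  | some j => simp [hlen]

theorem pvBGo_eq_altGo (lines : List String) (ps : List String) (k : Nat) (hk : k ≤ lines.length) :
    pvBGo lines ps ((k : Int) - 1) = pvAltGo ps (lines.drop k) := by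
  induction ps generalizing k with
  | nil => simp [pvBGo, pvAltGo]
  | cons p ps ih =>
    have hfind := pvF_find?_drop p lines k hk
    have hcons := pvConsume_eq_findIdx? p (lines.drop k)
    simp only [pvBGo, pvAltGo]
    rw [show ((PySem.List.enumerate lines 0).filter (fun il => PySem.Str.startswith il.2 p)).map (·.1)
        = pvF p 0 lines from rfl]
    rw [hfind, hcons]
    cases hidx : (lines.drop k).findIdx? (fun l => PySem.Chars.startswith l.toList p.toList) with
    | none => simp
    | some j =>
      have hj : j < (lines.drop k).length := (List.findIdx?_eq_some_iff_findIdx_eq.mp hidx).1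
      have hjk : k + j + 1 ≤ lines.length := by
        rw [List.length_drop] at hj; omega
      have h2 : ((k : Int) + (j : Int)) = ((k + j + 1 : Nat) : Int) - 1 := by push_cast; ring
      simp only [Option.bind_eq_bind, Option.bind_some, Option.pure_def, Option.map_some]
      rw [h2, ih (k + j + 1) hjk, List.drop_drop]
      congr 1

-- ===== VERDICT (by name: the statement is the Claim_ definition above) =====
theorem linewise_startswith_py_spec : Claim_equal_linewise_startswith_py := by
  intro text prefix_ _
  unfold Spec_linewise_startswith_py linewise_startswith_py linewise_startswith_py_alt
  simp only
  have hB := pvBGo_eq_altGo (PySem.Str.splitlines text) (PySem.Str.splitlines prefix_) 0 (by omega)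
  norm_num at hB
  rw [hB]
  cases hp : PySem.Str.splitlines prefix_ with
  | nil => simp [pvAltGo]
  | cons p ps =>
    have h0 : 0 < (p :: ps).length := by simp
    simpa using pvAGo_eq_altGo (p :: ps) (PySem.Str.splitlines text) 0 h0
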